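-- pv_equiv track=rewrite | github.com/sameaslooks/amnezia-panel | backend/awg_utils.py | parse_traffic_output
-- ===== SOURCE A (Python) =====
-- from typing import Dict, List, Optional
--
-- def parse_traffic_output(output: str) -> List[Dict[str, str]]:
--     """Парсит вывод команды 'awg show' в список словарей с ключами и статистикой."""
--     traffic = []
--     lines = output.split('\n')
--     current_peer = None
--     for line in lines:
--         line = line.strip()
--         if line.startswith('peer:'):
--             current_peer = line.split('peer:')[1].strip()
--             traffic.append({
--                 'public_key': current_peer,
--                 'transfer': '',
--                 'latest_handshake': 'Never'
--             })
--         elif 'transfer:' in line and current_peer: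
--             traffic[-1]['transfer'] = line.split('transfer:')[1].strip()
--         elif 'latest handshake:' in line and current_peer:
--             traffic[-1]['latest_handshake'] = line.split('latest handshake:')[1].strip()
--     return traffic
-- ===== SOURCE B (Python) =====
-- def _parse_block(block):
--     """Turn one peer block (header line + following lines) into its stats dict."""
--     stats = {
--         'public_key': block[0].split('peer:')[1].strip(),
--         'transfer': '',
--         'latest_handshake': 'Never',
--     }
--     for line in block[1:]:
--         if 'transfer:' in line:
--             stats['transfer'] = line.split('transfer:')[1].strip()
--         elif 'latest handshake:' in line:
--             stats['latest_handshake'] = line.split('latest handshake:')[1].strip()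
--     return stats
--
--
-- def parse_traffic_output(output):
--     """Split the output into per-peer blocks, then map each block to its stats."""
--     blocks = []
--     for raw in output.split('\n'):
--         line = raw.strip()
--         if line.startswith('peer:'):
--             blocks.append([line])
--         elif blocks:
--             blocks[-1].append(line)
--     return [_parse_block(block) for block in blocks]
-- ===== Notes on version B (the rewrite author's own statement) =====
-- stated objective: alternative
-- what changed: Replaces A's single stateful pass (traffic list mutated at [-1] under a current_peer flag) by a two-phase decomposition: first group the stripped lines into per-peer blocks, then map each block independently to its stats dict.
-- intended difference: On outputs where some 'peer:' header with an empty key is followed (before the next peer line) by stat lines whose final transfer/handshake values are not the defaults, A returns the default stats for that peer because current_peer='' is falsy, while B records the parsed stats for it as intended. — e.g. on parse_traffic_output("peer:\ntransfer: 1 B"): A returns [[("public_key", ""), ("transfer", ""), ("latest_handshake", "Never")]], B returns [[("public_key", ""), ("transfer", "1 B"), ("latest_handshake", "Never")]]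
import Mathlib
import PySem

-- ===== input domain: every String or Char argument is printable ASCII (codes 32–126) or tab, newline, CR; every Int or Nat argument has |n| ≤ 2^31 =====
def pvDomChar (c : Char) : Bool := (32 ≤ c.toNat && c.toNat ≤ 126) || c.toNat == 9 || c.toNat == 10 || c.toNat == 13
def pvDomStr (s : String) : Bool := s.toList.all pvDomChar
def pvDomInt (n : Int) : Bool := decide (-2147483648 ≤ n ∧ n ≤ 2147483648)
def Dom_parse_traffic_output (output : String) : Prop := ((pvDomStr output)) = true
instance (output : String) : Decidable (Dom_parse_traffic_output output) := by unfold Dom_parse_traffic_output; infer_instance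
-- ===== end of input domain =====

-- B replaces A's single stateful pass by a two-phase decomposition (group lines into
-- per-peer blocks, then map each block to its stats dict); objective: alternative.
-- On the D_ corner (stats under an empty-key peer header) B records the stats A drops.

-- line.split(sub)[1].strip()  (sub is a nonempty literal at every use, so split? is some;
-- the [1] access is reached only when sub occurs in line, so getD's default is unreachable)
def pvSegAfter (line sub : String) : String :=
  PySem.Str.strip (((PySem.Str.split? line sub).getD []).getD 1 "")

-- Python truthiness of current_peer (None or an empty string is falsy)
def pvTruthy : Option String → Bool
  | none => false
  | some s => !(s == "")

-- traffic[-1] = f(traffic[-1])  (Python raises on []; unreachable — guarded by current_peer)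
def pvUpdLast {α : Type} (f : α → α) : List α → List α
  | [] => []
  | [x] => [f x]
  | x :: y :: xs => x :: pvUpdLast f (y :: xs)

-- output.split('\n')  (the separator is nonempty, so split? is some)
def pvLines (output : String) : List String :=
  (PySem.Str.split? output "\n").getD []

-- ===== PORT A =====
-- one loop iteration of A over (traffic, current_peer)
def pvStepA (st : List (PySem.Dict String String) × Option String) (rawline : String) :
    List (PySem.Dict String String) × Option String :=
  let line := PySem.Str.strip rawline
  if PySem.Str.startswith line "peer:" then
    let cp := pvSegAfter line "peer:"
    (st.1 ++ [PySem.Dict.ofList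
        [("public_key", cp), ("transfer", ""), ("latest_handshake", "Never")]], some cp)
  else if PySem.Str.isIn "transfer:" line && pvTruthy st.2 then
    (pvUpdLast (fun d => d.insert "transfer" (pvSegAfter line "transfer:")) st.1, st.2)
  else if PySem.Str.isIn "latest handshake:" line && pvTruthy st.2 then
    (pvUpdLast (fun d => d.insert "latest_handshake" (pvSegAfter line "latest handshake:")) st.1, st.2)
  else st

def parse_traffic_output (output : String) : List (List (String × String)) :=
  let lines := pvLines output
  let res := lines.foldl pvStepA ([], none)
  res.1.map PySem.Dict.items

-- ===== PORT B =====
-- the body of _parse_block's for-loop: one stat line applied to the dict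
def pvScanStep (d : PySem.Dict String String) (line : String) : PySem.Dict String String :=
  if PySem.Str.isIn "transfer:" line then
    d.insert "transfer" (pvSegAfter line "transfer:")
  else if PySem.Str.isIn "latest handshake:" line then
    d.insert "latest_handshake" (pvSegAfter line "latest handshake:")
  else d

-- _parse_block(block)
def pvParseBlock (block : List String) : PySem.Dict String String :=
  (block.drop 1).foldl pvScanStep (PySem.Dict.ofList
    [("public_key", pvSegAfter (block.headD "") "peer:"),
     ("transfer", ""), ("latest_handshake", "Never")])

-- one iteration of B's block-grouping loop
def pvStepB (blocks : List (List String)) (rawline : String) : List (List String) :=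
  let line := PySem.Str.strip rawline
  if PySem.Str.startswith line "peer:" then blocks ++ [[line]]
  else if !blocks.isEmpty then pvUpdLast (fun b => b ++ [line]) blocks
  else blocks

def parse_traffic_output_alt (output : String) : List (List (String × String)) :=
  let blocks := (pvLines output).foldl pvStepB []
  blocks.map (fun b => (pvParseBlock b).items)

-- ===== PRECONDITION & SPEC =====
-- D_'s scanner: walk the stripped lines; e says whether the current peer header has an
-- empty key, t/h are the last-wins transfer/handshake values recorded since it; the
-- flag is raised when an empty-key peer's final values are not the defaults.
-- the current peer header has an empty key and its recorded values are not the defaults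
def pvNondef (e : Bool) (t h : String) : Bool := e && !(t == "" && h == "Never")

def pvScan (e : Bool) (t h : String) : List String → Bool
  | [] => pvNondef e t h
  | l :: ls =>
    let s := PySem.Str.strip l
    if PySem.Str.startswith s "peer:" then
      pvNondef e t h || pvScan (pvSegAfter s "peer:" == "") "" "Never" ls
    else if PySem.Str.isIn "transfer:" s then pvScan e (pvSegAfter s "transfer:") h ls
    else if PySem.Str.isIn "latest handshake:" s then
      pvScan e t (pvSegAfter s "latest handshake:") ls
    else pvScan e t h ls

-- On outputs where some 'peer:' header with an empty key is followed (before the next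
-- peer line) by stat lines whose final transfer/handshake values are not the defaults,
-- A returns the default stats for that peer because current_peer = '' is falsy, while B
-- records the parsed stats for it as intended.
def D_parse_traffic_output (output : String) : Prop :=
  pvScan false "" "Never" (pvLines output) = true
instance (output : String) : Decidable (D_parse_traffic_output output) := by
  unfold D_parse_traffic_output; infer_instance

def Spec_parse_traffic_output (output : String) (out : List (List (String × String))) : Prop := ¬ D_parse_traffic_output output → out = parse_traffic_output_alt output
instance (output : String) (out : List (List (String × String))) : Decidable (Spec_parse_traffic_output output out) := by unfold Spec_parse_traffic_output; infer_instance

def pvDiffWitness_parse_traffic_output : String := "peer:\ntransfer: 1 B"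
def pvDiffWitnessOut_parse_traffic_output :
    (List (List (String × String))) × (List (List (String × String))) :=
  ([[("public_key", ""), ("transfer", ""), ("latest_handshake", "Never")]],
   [[("public_key", ""), ("transfer", "1 B"), ("latest_handshake", "Never")]])

-- ===== CLAIM (what is proved, stated in full; the proofs are below) =====
def Claim_unchanged_parse_traffic_output : Prop := ∀ (output : String), Dom_parse_traffic_output output → Spec_parse_traffic_output output (parse_traffic_output output)
def Claim_changed_parse_traffic_output : Prop := Dom_parse_traffic_output (pvDiffWitness_parse_traffic_output) ∧ D_parse_traffic_output (pvDiffWitness_parse_traffic_output) ∧ parse_traffic_output (pvDiffWitness_parse_traffic_output) = pvDiffWitnessOut_parse_traffic_output.1 ∧ parse_traffic_output_alt (pvDiffWitness_parse_traffic_output) = pvDiffWitnessOut_parse_traffic_output.2 ∧ pvDiffWitnessOut_parse_traffic_output.1 ≠ pvDiffWitnessOut_parse_traffic_output.2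
def Claim_exact_parse_traffic_output : Prop := ∀ (output : String), Dom_parse_traffic_output output → D_parse_traffic_output output → parse_traffic_output output ≠ parse_traffic_output_alt output

-- ===== LEMMAS AND PROOFS =====

set_option maxHeartbeats 1000000

-- the header key of a block
def pvKey (b : List String) : String := pvSegAfter (b.headD "") "peer:"

-- the defaults dict for key k
def pvDefaults (k : String) : PySem.Dict String String :=
  PySem.Dict.ofList [("public_key", k), ("transfer", ""), ("latest_handshake", "Never")]

-- A's dict for a block: the stats are dropped when the header key is empty (falsy)
def pvABlock (b : List String) : PySem.Dict String String :=
  if pvKey b == "" then pvDefaults "" else pvParseBlock b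

-- last-wins (transfer, handshake) values of a block body
def pvTHStep (p : String × String) (s : String) : String × String :=
  if PySem.Str.isIn "transfer:" s then (pvSegAfter s "transfer:", p.2)
  else if PySem.Str.isIn "latest handshake:" s then (p.1, pvSegAfter s "latest handshake:")
  else p
def pvTH (body : List String) : String × String := body.foldl pvTHStep ("", "Never")

-- a block on which A's dict and B's dict disagree
def pvBadB (b : List String) : Prop := pvKey b = "" ∧ pvTH (b.drop 1) ≠ ("", "Never")

-- A's current_peer, reconstructed from B's accumulated blocks: key of the last block's header
def pvCurrentOf : List (List String) → Option String
  | [] => none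
  | [b] => some (pvSegAfter (b.headD "") "peer:")
  | _ :: b :: bs => pvCurrentOf (b :: bs)

theorem pvCurrentOf_append_singleton (bs : List (List String)) (b : List String) :
    pvCurrentOf (bs ++ [b]) = some (pvSegAfter (b.headD "") "peer:") := by
  induction bs with
  | nil => rfl
  | cons x xs ih =>
    cases xs with
    | nil => rfl
    | cons y ys => simpa [pvCurrentOf] using ih

theorem pvUpdLast_append {α : Type} (f : α → α) (bs : List α) (b : α) :
    pvUpdLast f (bs ++ [b]) = bs ++ [f b] := by
  induction bs with
  | nil => rfl
  | cons x xs ih =>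
    cases xs with
    | nil => rfl
    | cons y ys => simpa [pvUpdLast] using ih

theorem pvHeadD_append (x : List String) (l d : String) (hx : x ≠ []) :
    (x ++ [l]).headD d = x.headD d := by
  cases x with
  | nil => exact absurd rfl hx
  | cons a t => rfl

theorem pvKey_append (b : List String) (l : String) (hb : b ≠ []) :
    pvKey (b ++ [l]) = pvKey b := by
  unfold pvKey; rw [pvHeadD_append b l "" hb]

theorem pvDrop_one_append (b : List String) (l : String) (hb : b ≠ []) :
    (b ++ [l]).drop 1 = b.drop 1 ++ [l] := by
  cases b with
  | nil => exact absurd rfl hb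
  | cons a t => simp

-- a fresh block [l] has no body lines, so its stats are the three defaults
theorem pvParseBlock_singleton (l : String) :
    pvParseBlock [l] = pvDefaults (pvSegAfter l "peer:") := by
  simp [pvParseBlock, pvDefaults]

-- appending a body line to a nonempty block advances its stats by one scan step
theorem pvParseBlock_append (b : List String) (l : String) (hb : b ≠ []) :
    pvParseBlock (b ++ [l]) = pvScanStep (pvParseBlock b) l := by
  cases b with
  | nil => exact absurd rfl hb
  | cons h t => simp [pvParseBlock, List.foldl_append]

-- B's scan of a block body is exactly the pvTH fold applied to the three-entry dict
theorem pvFoldScan (ls : List String) : ∀ (k t h : String),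
    ls.foldl pvScanStep (PySem.Dict.ofList
      [("public_key", k), ("transfer", t), ("latest_handshake", h)])
    = PySem.Dict.ofList [("public_key", k), ("transfer", (ls.foldl pvTHStep (t, h)).1),
        ("latest_handshake", (ls.foldl pvTHStep (t, h)).2)] := by
  induction ls with
  | nil => intro k t h; rfl
  | cons l rest ih =>
    intro k t h
    rw [List.foldl_cons, List.foldl_cons]
    unfold pvScanStep pvTHStep
    by_cases h1 : PySem.Str.isIn "transfer:" l
    · simp only [h1, if_true]
      exact ih k (pvSegAfter l "transfer:") h
    · simp only [h1, Bool.false_eq_true, if_false]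
      by_cases h2 : PySem.Str.isIn "latest handshake:" l
      · simp only [h2, if_true]
        exact ih k t (pvSegAfter l "latest handshake:")
      · simp only [h2, Bool.false_eq_true, if_false]
        exact ih k t h

-- B's dict for a nonempty block, in closed form
theorem pvParseBlock_TH (b : List String) (hb : b ≠ []) :
    pvParseBlock b = PySem.Dict.ofList
      [("public_key", pvKey b), ("transfer", (pvTH (b.drop 1)).1),
       ("latest_handshake", (pvTH (b.drop 1)).2)] := by
  cases b with
  | nil => exact absurd rfl hb
  | cons h t =>
    unfold pvParseBlock pvKey pvTH
    simp only [List.headD_cons, List.drop_succ_cons, List.drop_zero]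
    exact pvFoldScan t (pvSegAfter h "peer:") "" "Never"

theorem pvABlock_singleton (l : String) :
    pvABlock [l] = pvDefaults (pvSegAfter l "peer:") := by
  unfold pvABlock
  by_cases h : pvKey [l] == ""
  · rw [if_pos h]
    have : pvKey [l] = "" := by simpa using h
    unfold pvKey at this
    simp only [List.headD_cons] at this
    rw [this]
  · rw [if_neg h, pvParseBlock_singleton]

-- a disagreeing block really yields two different dicts
theorem pvABlock_ne (b : List String) (hb : b ≠ []) (hbad : pvBadB b) :
    pvABlock b ≠ pvParseBlock b := by
  obtain ⟨hk, hth⟩ := hbad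
  unfold pvABlock
  rw [if_pos (by simpa using hk), pvParseBlock_TH b hb, hk]
  intro he
  have h2 : ([("public_key", ""), ("transfer", ""), ("latest_handshake", "Never")]
      : List (String × String))
      = [("public_key", ""), ("transfer", (pvTH (b.drop 1)).1),
         ("latest_handshake", (pvTH (b.drop 1)).2)] :=
    PySem.Dict.ext_iff.mp he
  simp only [List.cons.injEq, Prod.mk.injEq, and_true, true_and] at h2
  exact hth (Prod.ext_iff.mpr ⟨h2.1.symm, h2.2.symm⟩)

-- agreement outside pvBadB
theorem pvABlock_eq (b : List String) (hb : b ≠ []) (hgood : ¬ pvBadB b) :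
    pvABlock b = pvParseBlock b := by
  unfold pvABlock
  by_cases hk : pvKey b == ""
  · rw [if_pos hk]
    have hk' : pvKey b = "" := by simpa using hk
    have hth : pvTH (b.drop 1) = ("", "Never") := by
      by_contra hne
      exact hgood ⟨hk', hne⟩
    rw [pvParseBlock_TH b hb, hk', hth]
    rfl
  · rw [if_neg hk]

-- B's accumulated blocks are always nonempty (each starts with its header line)
theorem pvStepB_ne_nil (bs : List (List String)) (l : String)
    (h : ∀ b ∈ bs, b ≠ []) : ∀ b ∈ pvStepB bs l, b ≠ [] := by
  intro b hb
  by_cases hp : PySem.Str.startswith (PySem.Str.strip l) "peer:"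
  · rw [show pvStepB bs l = bs ++ [[PySem.Str.strip l]] from by
      simp only [pvStepB, hp, if_true]] at hb
    rcases List.mem_append.mp hb with hb | hb
    · exact h b hb
    · simp at hb; simp [hb]
  · by_cases hbs : bs = []
    · subst hbs
      rw [show pvStepB [] l = [] from by
        simp only [pvStepB, hp, Bool.false_eq_true, if_false, List.isEmpty_nil,
          Bool.not_true]] at hb
      simp at hb
    · have hni : (!bs.isEmpty) = true := by simp [hbs]
      rw [show pvStepB bs l = pvUpdLast (fun bb => bb ++ [PySem.Str.strip l]) bs from by
        simp only [pvStepB, hp, Bool.false_eq_true, if_false, hni, if_true]] at hb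
      rcases List.eq_nil_or_concat bs with rfl | ⟨zs, last, hc⟩
      · exact absurd rfl hbs
      · subst hc
        simp only [List.concat_eq_append] at hb h
        rw [pvUpdLast_append] at hb
        rcases List.mem_append.mp hb with hb | hb
        · exact h b (List.mem_append.mpr (Or.inl hb))
        · simp at hb; simp [hb]

-- MAIN STEP: one step of A from the state abstracted out of B's accumulated blocks
-- is the abstraction of one step of B (no side condition: pvABlock IS A's dict).
theorem pvStep_eq (bs : List (List String)) (l : String) (h : ∀ b ∈ bs, b ≠ []) :
    pvStepA (bs.map pvABlock, pvCurrentOf bs) l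
      = ((pvStepB bs l).map pvABlock, pvCurrentOf (pvStepB bs l)) := by
  simp only [pvStepA, pvStepB]
  by_cases hp : PySem.Str.startswith (PySem.Str.strip l) "peer:"
  · simp only [hp, if_true, List.map_append, List.map_cons, List.map_nil,
      pvABlock_singleton, pvCurrentOf_append_singleton, pvDefaults, List.headD_cons]
  · simp only [hp, Bool.false_eq_true, if_false]
    rcases List.eq_nil_or_concat bs with rfl | ⟨zs, last, hc⟩
    · simp only [pvCurrentOf, pvTruthy, List.map_nil, Bool.and_false,
        Bool.false_eq_true, if_false, List.isEmpty_nil, Bool.not_true]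
    · subst hc
      simp only [List.concat_eq_append] at h ⊢
      have hlast : last ≠ [] := h last (List.mem_append.mpr (Or.inr (by simp)))
      have hcur := pvCurrentOf_append_singleton zs last
      have hne : (!(zs ++ [last]).isEmpty) = true := by simp
      have hupd : pvUpdLast (fun b => b ++ [PySem.Str.strip l]) (zs ++ [last])
          = zs ++ [last ++ [PySem.Str.strip l]] := pvUpdLast_append _ zs last
      have hcur' : pvCurrentOf (zs ++ [last ++ [PySem.Str.strip l]])
          = pvCurrentOf (zs ++ [last]) := by
        rw [pvCurrentOf_append_singleton, hcur, pvHeadD_append last _ "" hlast]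
      by_cases hk : pvSegAfter (last.headD "") "peer:" = ""
      · -- untruthy current_peer: A skips the line; B appends it, but pvABlock ignores
        -- the body of an empty-key block
        have htr : pvTruthy (pvCurrentOf (zs ++ [last])) = false := by
          rw [hcur, hk]; decide
        have hF : pvABlock (last ++ [PySem.Str.strip l]) = pvABlock last := by
          unfold pvABlock pvKey
          rw [pvHeadD_append last _ "" hlast, hk]
          simp
        simp only [hcur] at htr
        simp only [hcur, htr, Bool.and_false, Bool.false_eq_true, if_false, hne,
          if_true, hupd, List.map_append, List.map_cons, List.map_nil, hF, hcur']
      · have htr : pvTruthy (some (pvSegAfter (last.headD "") "peer:")) = true := by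
          simp only [pvTruthy, Bool.not_eq_true', beq_eq_false_iff_ne, ne_eq]
          exact hk
        have hA : pvABlock last = pvParseBlock last := by
          unfold pvABlock pvKey
          rw [if_neg (by simpa using hk)]
        have hF : pvABlock (last ++ [PySem.Str.strip l])
            = pvScanStep (pvParseBlock last) (PySem.Str.strip l) := by
          unfold pvABlock pvKey
          rw [pvHeadD_append last _ "" hlast, if_neg (by simpa using hk),
            pvParseBlock_append last _ hlast]
        unfold pvScanStep at hF
        by_cases h1 : PySem.Str.isIn "transfer:" (PySem.Str.strip l)
        · simp only [h1, if_true] at hF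
          simp only [hcur, h1, htr, Bool.and_self, if_true, hne, hupd,
            List.map_append, List.map_cons, List.map_nil, hF, hA, hcur',
            pvUpdLast_append]
        · simp only [h1, Bool.false_eq_true, if_false] at hF
          by_cases h2 : PySem.Str.isIn "latest handshake:" (PySem.Str.strip l)
          · simp only [h2, if_true] at hF
            simp only [hcur, h1, h2, htr, Bool.false_and, Bool.and_self,
              Bool.false_eq_true, if_false, if_true, hne, hupd,
              List.map_append, List.map_cons, List.map_nil, hF, hA, hcur',
              pvUpdLast_append]
          · simp only [h2, Bool.false_eq_true, if_false] at hF
            simp only [hcur, h1, h2, Bool.false_and, Bool.false_eq_true, if_false, hne,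
              if_true, hupd,
              List.map_append, List.map_cons, List.map_nil, hF, hA, hcur']

-- the abstraction carried through the whole loop
theorem pvMain (ls : List String) :
    ∀ (bs : List (List String)), (∀ b ∈ bs, b ≠ []) →
      ls.foldl pvStepA (bs.map pvABlock, pvCurrentOf bs)
        = ((ls.foldl pvStepB bs).map pvABlock, pvCurrentOf (ls.foldl pvStepB bs)) := by
  induction ls with
  | nil => intro bs _; rfl
  | cons l t ih =>
    intro bs h
    rw [List.foldl_cons, List.foldl_cons, pvStep_eq bs l h]
    exact ih (pvStepB bs l) (pvStepB_ne_nil bs l h)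

-- pvStepB only touches the last block, so a closed prefix passes through the fold
theorem pvUpdLast_prefix {α : Type} (f : α → α) (zs bs : List α) (h : bs ≠ []) :
    pvUpdLast f (zs ++ bs) = zs ++ pvUpdLast f bs := by
  induction zs with
  | nil => rfl
  | cons z zt ih =>
    cases hzb : zt ++ bs with
    | nil => exact absurd (List.append_eq_nil_iff.mp hzb).2 h
    | cons a u =>
      show pvUpdLast f (z :: (zt ++ bs)) = _
      rw [hzb]
      show z :: pvUpdLast f (a :: u) = _
      rw [← hzb, ih]
      rfl

theorem pvStepB_append (zs bs : List (List String)) (l : String) (h : bs ≠ []) :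
    pvStepB (zs ++ bs) l = zs ++ pvStepB bs l := by
  by_cases hp : PySem.Str.startswith (PySem.Str.strip l) "peer:"
  · rw [show pvStepB (zs ++ bs) l = (zs ++ bs) ++ [[PySem.Str.strip l]] from by
        simp only [pvStepB, hp, if_true],
      show pvStepB bs l = bs ++ [[PySem.Str.strip l]] from by
        simp only [pvStepB, hp, if_true],
      List.append_assoc]
  · unfold pvStepB
    have h1 : (!(zs ++ bs).isEmpty) = true := by simp [h]
    have h2 : (!bs.isEmpty) = true := by simp [h]
    simp only [hp, Bool.false_eq_true, if_false, h1, h2, if_true]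
    exact pvUpdLast_prefix _ zs bs h

theorem pvStepB_keeps_ne_nil (bs : List (List String)) (l : String) (h : bs ≠ []) :
    pvStepB bs l ≠ [] := by
  by_cases hp : PySem.Str.startswith (PySem.Str.strip l) "peer:"
  · rw [show pvStepB bs l = bs ++ [[PySem.Str.strip l]] from by
        simp only [pvStepB, hp, if_true]]
    simp
  · unfold pvStepB
    have h2 : (!bs.isEmpty) = true := by simp [h]
    simp only [hp, Bool.false_eq_true, if_false, h2, if_true]
    rcases List.eq_nil_or_concat bs with rfl | ⟨zs, last, hc⟩
    · exact absurd rfl h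
    · subst hc
      simp only [List.concat_eq_append]
      rw [pvUpdLast_append]
      simp

theorem pvFoldB_append (ls : List String) :
    ∀ (zs bs : List (List String)), bs ≠ [] →
      ls.foldl pvStepB (zs ++ bs) = zs ++ ls.foldl pvStepB bs := by
  induction ls with
  | nil => intro zs bs _; rfl
  | cons l t ih =>
    intro zs bs h
    rw [List.foldl_cons, List.foldl_cons, pvStepB_append zs bs l h]
    exact ih zs (pvStepB bs l) (pvStepB_keeps_ne_nil bs l h)

-- one-step unfoldings of the scanner
theorem pvScan_nil (e : Bool) (t h : String) :
    pvScan e t h [] = pvNondef e t h := rfl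

theorem pvScan_cons (e : Bool) (t h l : String) (ls : List String) :
    pvScan e t h (l :: ls) =
      (if PySem.Str.startswith (PySem.Str.strip l) "peer:" then
        pvNondef e t h
          || pvScan (pvSegAfter (PySem.Str.strip l) "peer:" == "") "" "Never" ls
      else if PySem.Str.isIn "transfer:" (PySem.Str.strip l) then
        pvScan e (pvSegAfter (PySem.Str.strip l) "transfer:") h ls
      else if PySem.Str.isIn "latest handshake:" (PySem.Str.strip l) then
        pvScan e t (pvSegAfter (PySem.Str.strip l) "latest handshake:") ls
      else pvScan e t h ls) := rfl

-- the Bool flag the scanner emits for a closing block is exactly pvBadB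
theorem pvFlag_iff (b : List String) :
    pvNondef (pvKey b == "") (pvTH (b.drop 1)).1 (pvTH (b.drop 1)).2
      = true ↔ pvBadB b := by
  unfold pvBadB pvNondef
  constructor
  · intro h
    simp only [Bool.and_eq_true, Bool.not_eq_true', Bool.and_eq_false_iff,
      beq_iff_eq, beq_eq_false_iff_ne, ne_eq] at h
    refine ⟨h.1, fun he => ?_⟩
    rcases h.2 with h2 | h2 <;> exact h2 (by rw [he])
  · intro ⟨h1, h2⟩
    simp only [Bool.and_eq_true, Bool.not_eq_true', Bool.and_eq_false_iff,
      beq_iff_eq, beq_eq_false_iff_ne, ne_eq]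
    refine ⟨h1, ?_⟩
    by_cases ht : (pvTH (b.drop 1)).1 = ""
    · right; intro hh; exact h2 (Prod.ext_iff.mpr ⟨ht, hh⟩)
    · left; exact ht

-- SCANNER ↔ BLOCKS, active-block phase: the scanner's state is the current block's
-- key-emptiness and last-wins values
theorem pvScan_blocks (ls : List String) :
    ∀ (last : List String), last ≠ [] →
      (pvScan (pvKey last == "") (pvTH (last.drop 1)).1 (pvTH (last.drop 1)).2 ls = true
        ↔ ∃ b ∈ List.foldl pvStepB [last] ls, pvBadB b) := by
  induction ls with
  | nil =>
    intro last _
    rw [pvScan_nil, pvFlag_iff]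
    simp
  | cons l t ih =>
    intro last hlast
    by_cases hp : PySem.Str.startswith (PySem.Str.strip l) "peer:"
    · have hfold : List.foldl pvStepB [last] (l :: t)
          = [last] ++ List.foldl pvStepB [[PySem.Str.strip l]] t := by
        rw [List.foldl_cons,
          show pvStepB [last] l = [last] ++ [[PySem.Str.strip l]] from by
            simp only [pvStepB, hp, if_true]]
        exact pvFoldB_append t [last] [[PySem.Str.strip l]] (by simp)
      rw [hfold, pvScan_cons, if_pos hp, Bool.or_eq_true, pvFlag_iff]
      rw [show pvScan (pvSegAfter (PySem.Str.strip l) "peer:" == "") "" "Never" t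
          = pvScan (pvKey [PySem.Str.strip l] == "") (pvTH (List.drop 1 [PySem.Str.strip l])).1
              (pvTH (List.drop 1 [PySem.Str.strip l])).2 t from rfl,
        ih [PySem.Str.strip l] (by simp)]
      constructor
      · rintro (h | ⟨b, hb, hbad⟩)
        · exact ⟨last, by simp, h⟩
        · exact ⟨b, List.mem_append.mpr (Or.inr hb), hbad⟩
      · rintro ⟨b, hb, hbad⟩
        rcases List.mem_append.mp hb with hb | hb
        · simp only [List.mem_singleton] at hb; subst hb; exact Or.inl hbad
        · exact Or.inr ⟨b, hb, hbad⟩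
    · have hp' : PySem.Str.startswith (PySem.Str.strip l) "peer:" = false := by
        simpa using hp
      have hfold : List.foldl pvStepB [last] (l :: t)
          = List.foldl pvStepB [last ++ [PySem.Str.strip l]] t := by
        rw [List.foldl_cons,
          show pvStepB [last] l = [last ++ [PySem.Str.strip l]] from by
            simp only [pvStepB, hp', Bool.false_eq_true, if_false, List.isEmpty_cons,
              Bool.not_false, if_true]; rfl]
      rw [hfold, pvScan_cons, if_neg hp]
      have hth : pvTH ((last ++ [PySem.Str.strip l]).drop 1)
          = pvTHStep (pvTH (last.drop 1)) (PySem.Str.strip l) := by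
        unfold pvTH
        rw [pvDrop_one_append last _ hlast, List.foldl_append]
        rfl
      have hkey := pvKey_append last (PySem.Str.strip l) hlast
      have hgoal := ih (last ++ [PySem.Str.strip l]) (by simp [hlast])
      rw [hkey, hth] at hgoal
      unfold pvTHStep at hgoal
      by_cases h1 : PySem.Str.isIn "transfer:" (PySem.Str.strip l)
      · rw [if_pos h1]
        rw [if_pos h1] at hgoal
        exact hgoal
      · rw [if_neg h1]
        rw [if_neg h1] at hgoal
        by_cases h2 : PySem.Str.isIn "latest handshake:" (PySem.Str.strip l)
        · rw [if_pos h2]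
          rw [if_pos h2] at hgoal
          exact hgoal
        · rw [if_neg h2]
          rw [if_neg h2] at hgoal
          exact hgoal

-- SCANNER ↔ BLOCKS, initial phase (before the first peer header)
theorem pvScan_iff (ls : List String) :
    ∀ (t h : String),
      (pvScan false t h ls = true ↔ ∃ b ∈ List.foldl pvStepB [] ls, pvBadB b) := by
  induction ls with
  | nil =>
    intro t h
    rw [pvScan_nil, show pvNondef false t h = false from rfl]
    simp
  | cons l rest ih =>
    intro t h
    by_cases hp : PySem.Str.startswith (PySem.Str.strip l) "peer:"
    · have hfold : List.foldl pvStepB [] (l :: rest)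
          = List.foldl pvStepB [[PySem.Str.strip l]] rest := by
        rw [List.foldl_cons, show pvStepB [] l = [[PySem.Str.strip l]] from by
          simp only [pvStepB, hp, if_true, List.nil_append]]
      rw [hfold, pvScan_cons, if_pos hp,
        show pvNondef false t h = false from rfl, Bool.false_or]
      rw [show pvScan (pvSegAfter (PySem.Str.strip l) "peer:" == "") "" "Never" rest
          = pvScan (pvKey [PySem.Str.strip l] == "") (pvTH (List.drop 1 [PySem.Str.strip l])).1
              (pvTH (List.drop 1 [PySem.Str.strip l])).2 rest from rfl]
      exact pvScan_blocks rest [PySem.Str.strip l] (by simp)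
    · have hfold : List.foldl pvStepB [] (l :: rest) = List.foldl pvStepB [] rest := by
        rw [List.foldl_cons, show pvStepB [] l = [] from by
          simp only [pvStepB, hp, Bool.false_eq_true, if_false, List.isEmpty_nil,
            Bool.not_true]]
      rw [hfold, pvScan_cons, if_neg hp]
      by_cases h1 : PySem.Str.isIn "transfer:" (PySem.Str.strip l)
      · rw [if_pos h1]; exact ih _ _
      · rw [if_neg h1]
        by_cases h2 : PySem.Str.isIn "latest handshake:" (PySem.Str.strip l)
        · rw [if_pos h2]; exact ih _ _
        · rw [if_neg h2]; exact ih _ _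

-- both outputs, through the common block decomposition
theorem pvOutputs (output : String) :
    parse_traffic_output output
      = ((pvLines output).foldl pvStepB []).map (fun b => (pvABlock b).items)
    ∧ parse_traffic_output_alt output
      = ((pvLines output).foldl pvStepB []).map (fun b => (pvParseBlock b).items) := by
  constructor
  · simp only [parse_traffic_output]
    have h := pvMain (pvLines output) [] (by intro b hb; simp at hb)
    simp only [List.map_nil] at h
    rw [show pvCurrentOf [] = (none : Option String) from rfl] at h
    rw [h]
    simp [List.map_map, Function.comp]
  · simp only [parse_traffic_output_alt]

theorem pvBlocks_ne_nil (output : String) :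
    ∀ b ∈ (pvLines output).foldl pvStepB [], b ≠ [] := by
  have : ∀ (ls : List String) (bs : List (List String)), (∀ b ∈ bs, b ≠ []) →
      ∀ b ∈ ls.foldl pvStepB bs, b ≠ [] := by
    intro ls
    induction ls with
    | nil => intro bs h; exact h
    | cons l t ih =>
      intro bs h
      exact ih (pvStepB bs l) (pvStepB_ne_nil bs l h)
  exact this (pvLines output) [] (by intro b hb; simp at hb)

-- ===== VERDICT (by name: the statement is the Claim_ definition above) =====
theorem parse_traffic_output_spec : Claim_unchanged_parse_traffic_output := by
  intro output _
  unfold Spec_parse_traffic_output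
  intro hnd
  unfold D_parse_traffic_output at hnd
  obtain ⟨hA, hB⟩ := pvOutputs output
  rw [hA, hB]
  apply List.map_congr_left
  intro b hb
  rw [pvABlock_eq b (pvBlocks_ne_nil output b hb)
    (fun hbad => hnd ((pvScan_iff (pvLines output) "" "Never").mpr ⟨b, hb, hbad⟩))]

theorem parse_traffic_output_changed : Claim_changed_parse_traffic_output := by
  unfold Claim_changed_parse_traffic_output; decide

theorem parse_traffic_output_tight : Claim_exact_parse_traffic_output := by
  intro output _ hd
  unfold D_parse_traffic_output at hd
  obtain ⟨b, hb, hbad⟩ := (pvScan_iff (pvLines output) "" "Never").mp hd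
  obtain ⟨hA, hB⟩ := pvOutputs output
  rw [hA, hB]
  have hne : (pvABlock b).items ≠ (pvParseBlock b).items := by
    intro he
    exact pvABlock_ne b (pvBlocks_ne_nil output b hb) hbad (PySem.Dict.ext he)
  intro he
  obtain ⟨i, hi, hbi⟩ := List.mem_iff_getElem.mp hb
  have := congrArg (fun l => l[i]?) he
  simp only [List.getElem?_map, List.getElem?_eq_getElem hi, hbi, Option.map_some] at this
  exact hne (Option.some.injEq _ _ ▸ by simpa using this)
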